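-- pv_equiv track=rewrite | github.com/mezhaka/algo_competitions | hackercup/2020/qualification/a/a.py | solve
-- ===== SOURCE A (Python) =====
-- import functools
--
-- def solve(in_allowed, out_allowed):
--     N = len(in_allowed)
--
--     @functools.lru_cache(maxsize=None)
--     def f(out, in_):
--         if out == in_:
--             return True
--         direction = 1 if out < in_ else -1
--         intermediate = out + direction
--         canfly = (
--                 out_allowed[out] == 'Y'
--             and in_allowed[in_] == 'Y'
--             and (   intermediate == in_
--                  or (f(out, intermediate) and f(intermediate, in_))
--             )
--         )
--         return canfly
--
--     t = lambda x: 'Y' if x else 'N'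
--     return '\n'.join(
--                 ''.join(t(f(in_, out)) for out in range(N))
--                 for in_ in range(N))
-- ===== SOURCE B (Python) =====
-- def solve(in_allowed, out_allowed):
--     N = len(in_allowed)
--     # pre[t] = number of "blocked" cities among 0..t-1 (blocked: cannot be flown through)
--     pre = [0]
--     cnt = 0
--     for k in range(N):
--         if out_allowed[k] != 'Y' or in_allowed[k] != 'Y':
--             cnt += 1
--         pre.append(cnt)
--
--     def cell(r, c):
--         if r == c:
--             return 'Y'
--         if out_allowed[r] == 'Y' and in_allowed[c] == 'Y' and pre[max(r, c)] == pre[min(r, c) + 1]: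
--             return 'Y'
--         return 'N'
--
--     return '\n'.join(''.join(cell(r, c) for c in range(N)) for r in range(N))
-- ===== Notes on version B (the rewrite author's own statement) =====
-- stated objective: faster
-- what changed: Replaces the memoized recursion f(out,in_) by a direct grid construction: one pass precomputes prefix counts of blocked cities, then each cell is a==b or an O(1) endpoint-plus-empty-interval test.
-- outside the precondition, e.g. on solve('A', ''): A returns 'Y', B raises IndexError
import Mathlib
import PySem

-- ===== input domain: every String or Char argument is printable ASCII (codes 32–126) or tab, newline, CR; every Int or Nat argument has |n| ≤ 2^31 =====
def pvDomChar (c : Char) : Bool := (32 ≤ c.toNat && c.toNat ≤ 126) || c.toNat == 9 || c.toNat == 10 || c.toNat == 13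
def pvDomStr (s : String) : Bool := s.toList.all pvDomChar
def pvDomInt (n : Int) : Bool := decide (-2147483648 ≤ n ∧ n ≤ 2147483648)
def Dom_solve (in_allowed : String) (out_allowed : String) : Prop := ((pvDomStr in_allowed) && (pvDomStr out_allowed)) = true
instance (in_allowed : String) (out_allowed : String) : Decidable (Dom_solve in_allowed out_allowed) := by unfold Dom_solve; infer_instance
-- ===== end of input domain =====

-- B replaces A's memoized recursion by one prefix-count pass plus an O(1) test per cell;
-- the equivalence is about the return value (neither program mutates its arguments).

-- ===== PORT A =====
-- Python's f(out, in_): lru_cache only memoizes, the computed value is this recursion.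
-- Structural recursion on fuel := |in_ - out|, which bounds the recursion depth exactly,
-- so the fuel-0 fallback is never reached on the calls pvFA makes (a totality guard only).
def pvFAgo (ia oa : List Char) (fuel : Nat) (out in_ : Int) : Bool :=
  if out = in_ then true
  else
    match fuel with
    | 0 => true
    | Nat.succ fuel =>
      let intermediate := out + (if out < in_ then 1 else -1)
      (PySem.List.pyGetD oa out ' ' == 'Y') &&
      ((PySem.List.pyGetD ia in_ ' ' == 'Y') &&
       (if intermediate = in_ then true
        else pvFAgo ia oa fuel out intermediate && pvFAgo ia oa fuel intermediate in_))

def pvFA (ia oa : List Char) (out in_ : Int) : Bool :=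
  pvFAgo ia oa (in_ - out).natAbs out in_

def solve (in_allowed : String) (out_allowed : String) : String :=
  let N : Int := PySem.Str.len in_allowed
  PySem.Str.join "\n" ((PySem.List.pyRange 0 N 1).map (fun in_ =>
    PySem.Str.join "" ((PySem.List.pyRange 0 N 1).map (fun out =>
      if pvFA in_allowed.toList out_allowed.toList in_ out then "Y" else "N"))))

-- ===== PORT B =====
def pvCellB (ia oa : List Char) (pre : List Int) (r c : Int) : String :=
  if r = c then "Y"
  else if (PySem.List.pyGetD oa r ' ' == 'Y') &&
          ((PySem.List.pyGetD ia c ' ' == 'Y') &&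
           (PySem.List.pyGetD pre (max r c) 0 == PySem.List.pyGetD pre (min r c + 1) 0)) then "Y"
  else "N"

def solve_alt (in_allowed : String) (out_allowed : String) : String :=
  let ia := in_allowed.toList
  let oa := out_allowed.toList
  let N : Int := PySem.Str.len in_allowed
  let pre : List Int :=
    ((PySem.List.pyRange 0 N 1).foldl (fun st k =>
        let cnt := if !(PySem.List.pyGetD oa k ' ' == 'Y') || !(PySem.List.pyGetD ia k ' ' == 'Y')
                   then st.1 + 1 else st.1
        (cnt, st.2 ++ [cnt])) ((0 : Int), ([0] : List Int))).2
  PySem.Str.join "\n" ((PySem.List.pyRange 0 N 1).map (fun r =>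
    PySem.Str.join "" ((PySem.List.pyRange 0 N 1).map (fun c =>
      pvCellB ia oa pre r c))))

-- ===== PRECONDITION & SPEC =====
-- Pre_ excludes the inputs on which Python A raises IndexError (out_allowed shorter than
-- in_allowed with at least two cities); the only excluded inputs on which A still returns
-- are one-city inputs with too-short out_allowed, where B's prefix pass itself raises IndexError.
def Pre_solve (in_allowed : String) (out_allowed : String) : Prop :=
  in_allowed.toList.length ≤ out_allowed.toList.length
instance (in_allowed : String) (out_allowed : String) : Decidable (Pre_solve in_allowed out_allowed) := by
  unfold Pre_solve; infer_instance
def pvWitness_solve : String × String := ("YNY", "YYY")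
def Spec_solve (in_allowed : String) (out_allowed : String) (out : String) : Prop := out = solve_alt in_allowed out_allowed
instance (in_allowed : String) (out_allowed : String) (out : String) : Decidable (Spec_solve in_allowed out_allowed out) := by unfold Spec_solve; infer_instance

-- ===== CLAIM (what is proved, stated in full; the proofs are below) =====
def Claim_equal_solve : Prop := ∀ (in_allowed : String) (out_allowed : String), Dom_solve in_allowed out_allowed → Pre_solve in_allowed out_allowed → Spec_solve in_allowed out_allowed (solve in_allowed out_allowed)

-- ===== LEMMAS AND PROOFS =====

-- a city k can be flown through: both directions allowed there
def pvOpen (ia oa : List Char) (k : Int) : Bool :=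
  (PySem.List.pyGetD oa k ' ' == 'Y') && (PySem.List.pyGetD ia k ' ' == 'Y')

-- all cities strictly between a and b are open
def pvAllBtw (ia oa : List Char) (a b : Int) : Bool :=
  (PySem.List.pyRange (min a b + 1) (max a b) 1).all (pvOpen ia oa)

-- number of blocked cities among 0..t-1
def pvCnt (ia oa : List Char) (t : Nat) : Int :=
  ((List.range t).countP (fun k : Nat => !(pvOpen ia oa (k : Int))) : Int)

lemma pvAllBtw_adj (ia oa : List Char) (a b : Int) (h : (b - a).natAbs = 1) :
    pvAllBtw ia oa a b = true := by
  unfold pvAllBtw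
  rw [PySem.List.pyRange_one_eq_nil (by omega)]
  rfl

lemma pvFAgo_eq (ia oa : List Char) : ∀ (n : Nat) (a b : Int), (b - a).natAbs ≤ n →
    pvFAgo ia oa n a b =
      (a == b || ((PySem.List.pyGetD oa a ' ' == 'Y') &&
        ((PySem.List.pyGetD ia b ' ' == 'Y') && pvAllBtw ia oa a b))) := by
  intro n
  induction n with
  | zero =>
    intro a b hn
    have hab : a = b := by omega
    subst hab
    simp [pvFAgo]
  | succ n ih =>
    intro a b hn
    rw [pvFAgo]
    by_cases hab : a = b
    · subst hab; simp
    · rw [if_neg hab]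
      have habF : (a == b) = false := by simp [hab]
      by_cases hlt : a < b
      · simp only [if_pos hlt]
        by_cases hm : a + 1 = b
        · rw [if_pos hm]
          rw [pvAllBtw_adj ia oa a b (by omega)]
          simp [habF]
        · rw [if_neg hm]
          rw [ih a (a + 1) (by omega)]
          rw [ih (a + 1) b (by omega)]
          rw [pvAllBtw_adj ia oa a (a + 1) (by omega)]
          have e2 : pvAllBtw ia oa a b = (pvOpen ia oa (a + 1) && pvAllBtw ia oa (a + 1) b) := by
            unfold pvAllBtw
            rw [min_eq_left hlt.le, max_eq_right hlt.le,
                min_eq_left (by omega : (a + 1 : Int) ≤ b), max_eq_right (by omega : (a + 1 : Int) ≤ b)]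
            rw [PySem.List.pyRange_one_cons (by omega : (a + 1 : Int) < b)]
            simp
          rw [e2, habF]
          have h1F : ((a : Int) == a + 1) = false := by rw [beq_eq_false_iff_ne]; omega
          have h2F : ((a + 1 : Int) == b) = false := by rw [beq_eq_false_iff_ne]; omega
          rw [h1F, h2F]
          unfold pvOpen
          cases (PySem.List.pyGetD oa a ' ' == 'Y') <;>
            cases (PySem.List.pyGetD ia b ' ' == 'Y') <;>
            cases (PySem.List.pyGetD oa (a + 1) ' ' == 'Y') <;>
            cases (PySem.List.pyGetD ia (a + 1) ' ' == 'Y') <;>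
            cases (pvAllBtw ia oa (a + 1) b) <;> simp
      · have hgt : b < a := by omega
        simp only [if_neg hlt]
        by_cases hm : a + -1 = b
        · rw [if_pos hm]
          rw [pvAllBtw_adj ia oa a b (by omega)]
          simp [habF]
        · rw [if_neg hm]
          rw [ih a (a + -1) (by omega)]
          rw [ih (a + -1) b (by omega)]
          rw [pvAllBtw_adj ia oa a (a + -1) (by omega)]
          have e2 : pvAllBtw ia oa a b = (pvAllBtw ia oa (a + -1) b && pvOpen ia oa (a + -1)) := by
            unfold pvAllBtw
            rw [min_eq_right hgt.le, max_eq_left hgt.le,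
                min_eq_right (by omega : b ≤ (a + -1 : Int)), max_eq_left (by omega : b ≤ (a + -1 : Int))]
            have e := PySem.List.pyRange_one_succ_right (by omega : (b + 1 : Int) ≤ a + -1)
            rw [show (a + -1 + 1 : Int) = a from by ring] at e
            rw [e]
            simp
          rw [e2, habF]
          have h1F : ((a : Int) == a + -1) = false := by rw [beq_eq_false_iff_ne]; omega
          have h2F : ((a + -1 : Int) == b) = false := by rw [beq_eq_false_iff_ne]; omega
          rw [h1F, h2F]
          unfold pvOpen
          cases (PySem.List.pyGetD oa a ' ' == 'Y') <;>
            cases (PySem.List.pyGetD ia b ' ' == 'Y') <;>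
            cases (PySem.List.pyGetD oa (a + -1) ' ' == 'Y') <;>
            cases (PySem.List.pyGetD ia (a + -1) ' ' == 'Y') <;>
            cases (pvAllBtw ia oa (a + -1) b) <;> simp

lemma pre_spec (ia oa : List Char) (N : Nat) :
    ((PySem.List.pyRange 0 (N : Int) 1).foldl (fun st k =>
        let cnt := if !(PySem.List.pyGetD oa k ' ' == 'Y') || !(PySem.List.pyGetD ia k ' ' == 'Y')
                   then st.1 + 1 else st.1
        (cnt, st.2 ++ [cnt])) ((0 : Int), ([0] : List Int)))
      = (pvCnt ia oa N, (List.range (N + 1)).map (fun t => pvCnt ia oa t)) := by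
  induction N with
  | zero =>
    simp only [Nat.cast_zero]
    rw [PySem.List.pyRange_one_eq_nil le_rfl]
    simp [pvCnt]
  | succ n ihn =>
    rw [show ((n + 1 : Nat) : Int) = (n : Int) + 1 from by push_cast; ring]
    rw [PySem.List.pyRange_one_succ_right (by positivity)]
    rw [List.foldl_append, ihn]
    have hc : (if !(PySem.List.pyGetD oa (n : Int) ' ' == 'Y') || !(PySem.List.pyGetD ia (n : Int) ' ' == 'Y')
               then pvCnt ia oa n + 1 else pvCnt ia oa n) = pvCnt ia oa (n + 1) := by
      unfold pvCnt
      rw [List.range_succ, List.countP_append]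
      simp only [List.countP_cons, List.countP_nil, pvOpen, Bool.not_and]
      split_ifs with h <;> push_cast <;> omega
    simp only [List.foldl_cons, List.foldl_nil]
    rw [hc]
    rw [List.range_succ (n := n + 1), List.map_append]
    simp only [List.map_cons, List.map_nil]

lemma cnt_eq_iff (ia oa : List Char) (a b : Nat) (hab : a ≤ b) :
    (pvCnt ia oa b = pvCnt ia oa a) ↔ (∀ k : Nat, a ≤ k → k < b → pvOpen ia oa (k : Int) = true) := by
  unfold pvCnt
  rw [show b = a + (b - a) from by omega, List.range_add, List.countP_append]
  push_cast
  constructor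
  · intro h k hk1 hk2
    have h0 : List.countP (fun k : Nat => !pvOpen ia oa (k : Int)) ((List.range (b - a)).map (fun x => a + x)) = 0 := by
      omega
    rw [List.countP_eq_zero] at h0
    have := h0 (a + (k - a)) (List.mem_map.2 ⟨k - a, List.mem_range.2 (by omega), rfl⟩)
    rw [show a + (k - a) = k from by omega] at this
    simpa using this
  · intro h
    have h0 : List.countP (fun k : Nat => !pvOpen ia oa (k : Int)) ((List.range (b - a)).map (fun x => a + x)) = 0 := by
      rw [List.countP_eq_zero]
      intro x hx
      obtain ⟨j, hj, rfl⟩ := List.mem_map.1 hx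
      rw [List.mem_range] at hj
      simpa using h (a + j) (by omega) (by omega)
    omega

lemma allBtw_iff (ia oa : List Char) (r c : Int) (hr : 0 ≤ r) (hc : 0 ≤ c) (hne : r ≠ c) :
    pvAllBtw ia oa r c = (pvCnt ia oa (max r c).toNat == pvCnt ia oa (min r c + 1).toNat) := by
  have hlo : 0 ≤ min r c := le_min hr hc
  have hlohi : min r c < max r c := by rcases lt_or_gt_of_ne hne with h | h <;> simp [min, max] <;> omega
  rw [Bool.eq_iff_iff]
  unfold pvAllBtw
  simp only [List.all_eq_true, beq_iff_eq]
  rw [cnt_eq_iff ia oa ((min r c + 1).toNat) ((max r c).toNat) (by omega)]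
  constructor
  · intro h k hk1 hk2
    apply h
    rw [PySem.List.mem_pyRange_one]
    omega
  · intro h x hx
    rw [PySem.List.mem_pyRange_one] at hx
    rw [show x = ((x.toNat : Nat) : Int) from by omega]
    exact h x.toNat (by omega) (by omega)

lemma cell_eq (ia oa : List Char) (N : Nat) (r c : Int)
    (hr0 : 0 ≤ r) (hrN : r < (N : Int)) (hc0 : 0 ≤ c) (hcN : c < (N : Int)) :
    (if pvFA ia oa r c then "Y" else "N")
      = pvCellB ia oa ((List.range (N + 1)).map (fun t => pvCnt ia oa t)) r c := by
  by_cases hrc : r = c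
  · subst hrc
    simp [pvFA, pvFAgo, pvCellB]
  · have hlen : (((List.range (N + 1)).map (fun t => pvCnt ia oa t)).length : Int) = (N : Int) + 1 := by
      simp
    have hmax : PySem.List.pyGetD ((List.range (N + 1)).map (fun t => pvCnt ia oa t)) (max r c) 0
        = pvCnt ia oa (max r c).toNat := by
      rw [PySem.List.pyGetD_eq_getElem _ 0 (by omega) (by omega)]
      simp
    have hmin : PySem.List.pyGetD ((List.range (N + 1)).map (fun t => pvCnt ia oa t)) (min r c + 1) 0
        = pvCnt ia oa (min r c + 1).toNat := by
      rw [PySem.List.pyGetD_eq_getElem _ 0 (by omega) (by omega)]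
      simp
    rw [pvFA, pvFAgo_eq ia oa ((c - r).natAbs) r c le_rfl]
    unfold pvCellB
    rw [if_neg hrc, hmax, hmin, allBtw_iff ia oa r c hr0 hc0 hrc]
    simp [hrc]

-- ===== VERDICT (by name: the statement is the Claim_ definition above) =====
theorem solve_spec : Claim_equal_solve := by
  intro in_allowed out_allowed _ _
  unfold Spec_solve
  simp only [solve, solve_alt, PySem.Str.len_eq]
  rw [pre_spec]
  apply congrArg (PySem.Str.join "\n")
  apply List.map_congr_left
  intro r hr
  apply congrArg (PySem.Str.join "")
  apply List.map_congr_left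
  intro c hc
  rw [PySem.List.mem_pyRange_one] at hr hc
  exact cell_eq in_allowed.toList out_allowed.toList _ r c hr.1 hr.2 hc.1 hc.2
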